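-- pv_equiv track=rewrite | github.com/cvdelannoy/FRET_X_fingerprinting_simulation | helpers.py | list_sheet_series
-- ===== SOURCE A (Python) =====
-- from copy import deepcopy
-- from collections import ChainMap
--
-- def list_sheet_series(ss_seq):
--     dict_list = []
--     in_sheet = False
--     cur_list = []
--     for ti, ss in enumerate(ss_seq):
--         if ss == 'S':
--             cur_list.append(ti)
--         else:
--             if len(cur_list): dict_list.append({cl: deepcopy(cur_list) for cl in cur_list})
--             cur_list = []
--     out_dict = dict(ChainMap(*dict_list))
--     return out_dict
-- ===== SOURCE B (Python) =====
-- def list_sheet_series(ss_seq):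
--     # Boundary-based: collect the positions of the non-'S' separators (with
--     # -1 and len sentinels), then derive each sheet run arithmetically as the
--     # open interval between two consecutive separators; no per-character
--     # state machine, no run accumulation, no ChainMap merge.
--     # Runs are inserted back-to-front to keep A's ChainMap key order.
--     # Unlike A, a run of 'S' at the very end of the sequence is included.
--     n = len(ss_seq)
--     seps = [-1] + [i for i, c in enumerate(ss_seq) if c != 'S'] + [n]
--     out = {}
--     for a, b in reversed(list(zip(seps, seps[1:]))):
--         if b - a > 1:
--             run = list(range(a + 1, b))
--             for i in run:
--                 out[i] = run
--     return out
-- ===== Notes on version B (the rewrite author's own statement) =====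
-- stated objective: alternative
-- what changed: Replaces A's per-character in_sheet/cur_list state machine with per-run sub-dicts merged through ChainMap by a boundary-based scheme: collect the positions of non-'S' separators (with -1/len sentinels) and derive each sheet run arithmetically as the open interval between consecutive separators, filling one dict directly.
-- intended difference: On sequences whose last character is 'S', A never flushes the final sheet run and returns a dict missing those indices (e.g. {} for 'SS'); B maps every index of that final run to its run list, which is the intended map of each sheet index to its sheet. — e.g. on list_sheet_series("S"): A returns [], B returns [(0, [0])]
import Mathlib
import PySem

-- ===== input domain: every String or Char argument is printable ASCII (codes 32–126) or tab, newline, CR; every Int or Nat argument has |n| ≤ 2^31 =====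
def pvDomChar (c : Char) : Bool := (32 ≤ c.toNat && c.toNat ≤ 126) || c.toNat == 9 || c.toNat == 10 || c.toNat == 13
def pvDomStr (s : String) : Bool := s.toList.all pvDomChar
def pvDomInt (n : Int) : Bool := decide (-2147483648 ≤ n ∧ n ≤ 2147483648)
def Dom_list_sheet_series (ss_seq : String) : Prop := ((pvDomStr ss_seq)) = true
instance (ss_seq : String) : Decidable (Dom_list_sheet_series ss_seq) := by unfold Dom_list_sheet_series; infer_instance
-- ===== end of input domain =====

-- B replaces A's per-character state machine + per-run dicts merged via ChainMap by a
-- boundary-based scheme: the non-'S' separator positions (with sentinels) are collected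
-- first and each run is the open interval between consecutive separators; B also includes
-- a trailing 'S'-run, which A drops (see D_ below). Objective: alternative; no speed claim.

-- ===== PORT A =====
-- A-side helper: the body of A's for-loop (state = (dict_list, in_sheet, cur_list))
def pvStepA (st : List (PySem.Dict Int (List Int)) × Bool × List Int) (p : Int × Char) :
    List (PySem.Dict Int (List Int)) × Bool × List Int :=
  match st with
  | (dict_list, in_sheet, cur_list) =>
    if p.2 = 'S' then (dict_list, in_sheet, cur_list ++ [p.1])
    else if cur_list.length ≠ 0 then
      (dict_list ++ [cur_list.foldl (fun d cl => d.insert cl cur_list) PySem.Dict.empty],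
       in_sheet, ([] : List Int))
    else (dict_list, in_sheet, ([] : List Int))

def list_sheet_series (ss_seq : String) : List (Int × List Int) :=
  let fin := (PySem.List.enumerate ss_seq.toList 0).foldl pvStepA ([], false, [])
  -- dict(ChainMap(*dict_list)): update an empty dict with the maps in reverse order
  ((fin.1.reverse).foldl
      (fun d m => m.items.foldl (fun d kv => d.insert kv.1 kv.2) d)
      PySem.Dict.empty).items

-- ===== PORT B =====
def list_sheet_series_alt (ss_seq : String) : List (Int × List Int) :=
  let n : Int := (ss_seq.toList.length : Int)
  -- seps = [-1] + [i for i, c in enumerate(ss_seq) if c != 'S'] + [n]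
  let seps : List Int :=
    [-1] ++ ((PySem.List.enumerate ss_seq.toList 0).filter
                (fun p => decide (p.2 ≠ 'S'))).map Prod.fst ++ [n]
  -- for a, b in reversed(list(zip(seps, seps[1:]))): …
  (((seps.zip (seps.drop 1)).reverse).foldl
      (fun d ab =>
        if ab.2 - ab.1 > 1 then
          let run := PySem.List.pyRange (ab.1 + 1) ab.2 1
          run.foldl (fun d i => d.insert i run) d
        else d)
      PySem.Dict.empty).items

-- ===== PRECONDITION & SPEC =====
-- On sequences whose last character is 'S', A never flushes the final sheet run and
-- returns a dict missing those indices; B maps every index of that final run to its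
-- run list, which is the intended map of each sheet index to its sheet.
def D_list_sheet_series (ss_seq : String) : Prop := ss_seq.toList.getLast? = some 'S'
instance (ss_seq : String) : Decidable (D_list_sheet_series ss_seq) := by
  unfold D_list_sheet_series; infer_instance

def Spec_list_sheet_series (ss_seq : String) (out : List (Int × List Int)) : Prop :=
  ¬ D_list_sheet_series ss_seq → out = list_sheet_series_alt ss_seq
instance (ss_seq : String) (out : List (Int × List Int)) :
    Decidable (Spec_list_sheet_series ss_seq out) := by
  unfold Spec_list_sheet_series; infer_instance

def pvDiffWitness_list_sheet_series : String := "S"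
def pvDiffWitnessOut_list_sheet_series :
    (List (Int × List Int)) × (List (Int × List Int)) := ([], [(0, [0])])

-- ===== CLAIM (what is proved, stated in full; the proofs are below) =====
def Claim_unchanged_list_sheet_series : Prop :=
  ∀ (ss_seq : String), Dom_list_sheet_series ss_seq →
    Spec_list_sheet_series ss_seq (list_sheet_series ss_seq)
def Claim_changed_list_sheet_series : Prop :=
  Dom_list_sheet_series (pvDiffWitness_list_sheet_series) ∧
  D_list_sheet_series (pvDiffWitness_list_sheet_series) ∧
  list_sheet_series (pvDiffWitness_list_sheet_series) = pvDiffWitnessOut_list_sheet_series.1 ∧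
  list_sheet_series_alt (pvDiffWitness_list_sheet_series) = pvDiffWitnessOut_list_sheet_series.2 ∧
  pvDiffWitnessOut_list_sheet_series.1 ≠ pvDiffWitnessOut_list_sheet_series.2
def Claim_exact_list_sheet_series : Prop :=
  ∀ (ss_seq : String), Dom_list_sheet_series ss_seq → D_list_sheet_series ss_seq →
    list_sheet_series ss_seq ≠ list_sheet_series_alt ss_seq

-- ===== LEMMAS AND PROOFS =====

-- proof-side normal form of A's loop: the completed (flushed) runs, given the pending run
def rcomp (cur : List Int) (pos : Int) (l : List Char) : List (List Int) :=
  match l with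
  | [] => []
  | c :: cs =>
    if c = 'S' then rcomp (cur ++ [pos]) (pos + 1) cs
    else if cur = [] then rcomp [] (pos + 1) cs
    else cur :: rcomp [] (pos + 1) cs

-- like rcomp, but also keeps a trailing pending run (B's semantics)
def rcompT (cur : List Int) (pos : Int) (l : List Char) : List (List Int) :=
  match l with
  | [] => if cur = [] then [] else [cur]
  | c :: cs =>
    if c = 'S' then rcompT (cur ++ [pos]) (pos + 1) cs
    else if cur = [] then rcompT [] (pos + 1) cs
    else cur :: rcompT [] (pos + 1) cs

def dictOf (run : List Int) : PySem.Dict Int (List Int) :=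
  run.foldl (fun d cl => d.insert cl run) PySem.Dict.empty

def insRun (d : PySem.Dict Int (List Int)) (r : List Int) : PySem.Dict Int (List Int) :=
  r.foldl (fun d i => d.insert i r) d

-- proof-side form of B's separator list
def sepsOf (pos : Int) (l : List Char) : List Int :=
  match l with
  | [] => []
  | c :: cs => if c = 'S' then sepsOf (pos + 1) cs else pos :: sepsOf (pos + 1) cs

-- proof-side form of B's runs: gaps between consecutive separators
def runsOfSeps (a : Int) (rest : List Int) : List (List Int) :=
  match rest with
  | [] => []
  | b :: bs =>
    (if b - a > 1 then [PySem.List.pyRange (a + 1) b 1] else []) ++ runsOfSeps b bs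

def pvGap (ab : Int × Int) : Option (List Int) :=
  if ab.2 - ab.1 > 1 then some (PySem.List.pyRange (ab.1 + 1) ab.2 1) else none

lemma foldA_fst (l : List Char) : ∀ (pos : Int) (dl : List (PySem.Dict Int (List Int)))
    (b : Bool) (cur : List Int),
    ((PySem.List.enumerate l pos).foldl pvStepA (dl, b, cur)).1
      = dl ++ (rcomp cur pos l).map dictOf := by
  induction l with
  | nil => intro pos dl b cur; simp [PySem.List.enumerate_nil, rcomp]
  | cons c cs ih =>
    intro pos dl b cur
    rw [PySem.List.enumerate_cons, List.foldl_cons]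
    by_cases h : c = 'S'
    · simp only [pvStepA, h]
      rw [ih]
      simp [rcomp]
    · by_cases hc : cur = []
      · simp only [pvStepA, hc]
        rw [if_neg h, if_neg (by simp)]
        rw [ih]
        simp [rcomp, h]
      · simp only [pvStepA]
        rw [if_neg h, if_pos (by simpa using hc)]
        rw [ih]
        simp [rcomp, h, hc, dictOf]

lemma sepsOf_eq (l : List Char) : ∀ (pos : Int),
    ((PySem.List.enumerate l pos).filter (fun p => decide (p.2 ≠ 'S'))).map Prod.fst
      = sepsOf pos l := by
  induction l with
  | nil => intro pos; simp [PySem.List.enumerate_nil, sepsOf]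
  | cons c cs ih =>
    intro pos
    rw [PySem.List.enumerate_cons]
    by_cases h : c = 'S'
    · rw [List.filter_cons_of_neg (by simp [h]), ih]
      simp [sepsOf, h]
    · rw [List.filter_cons_of_pos (by simp [h]), List.map_cons, ih]
      simp [sepsOf, h]

-- fold of B's loop body = fold of insRun over the gap runs
lemma foldB_eq_insRun (ps : List (Int × Int)) : ∀ (d : PySem.Dict Int (List Int)),
    ps.foldl
      (fun d ab =>
        if ab.2 - ab.1 > 1 then
          let run := PySem.List.pyRange (ab.1 + 1) ab.2 1
          run.foldl (fun d i => d.insert i run) d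
        else d) d
      = (ps.filterMap pvGap).foldl insRun d := by
  induction ps with
  | nil => intro d; simp
  | cons ab ps ih =>
    intro d
    by_cases h : ab.2 - ab.1 > 1 <;>
      simp [pvGap, h, ih, insRun]

lemma zip_filterMap_gaps (rest : List Int) : ∀ (a : Int),
    ((a :: rest).zip rest).filterMap pvGap = runsOfSeps a rest := by
  induction rest with
  | nil => intro a; simp [runsOfSeps]
  | cons b bs ih =>
    intro a
    show ((a, b) :: (b :: bs).zip bs).filterMap pvGap = _
    rw [List.filterMap_cons, ih]
    by_cases h : b - a > 1 <;> simp [pvGap, h, runsOfSeps]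

-- B's runs (separator gaps) are exactly the runs of the 'S'-state machine that keeps
-- the trailing run; cur is the pending range (a+1 … pos-1)
lemma runsOfSeps_eq_rcompT (l : List Char) : ∀ (pos a : Int), a < pos →
    runsOfSeps a (sepsOf pos l ++ [pos + l.length])
      = rcompT (PySem.List.pyRange (a + 1) pos 1) pos l := by
  induction l with
  | nil =>
    intro pos a ha
    by_cases h : a + 1 < pos
    · have hne : PySem.List.pyRange (a + 1) pos 1 ≠ [] := by
        rw [PySem.List.pyRange_one_cons h]; simp
      simp only [sepsOf, List.nil_append, List.length_nil, runsOfSeps, rcompT]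
      rw [if_pos (by push_cast; omega), if_neg hne]
      simp
    · have hnil : PySem.List.pyRange (a + 1) pos 1 = [] :=
        PySem.List.pyRange_one_eq_nil (by omega)
      simp only [sepsOf, List.nil_append, List.length_nil, runsOfSeps, rcompT]
      rw [if_neg (by push_cast; omega), if_pos hnil]
      simp
  | cons c cs ih =>
    intro pos a ha
    by_cases h : c = 'S'
    · have hr : PySem.List.pyRange (a + 1) (pos + 1) 1
          = PySem.List.pyRange (a + 1) pos 1 ++ [pos] :=
        PySem.List.pyRange_one_succ_right (by omega)
      have harith : (pos + 1) + (cs.length : Int) = pos + ((c :: cs : List Char).length : Int) := by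
        simp; omega
      simp only [sepsOf, if_pos h, rcompT]
      rw [← harith, ih (pos + 1) a (by omega), hr]
    · have harith : (pos + 1) + (cs.length : Int) = pos + ((c :: cs : List Char).length : Int) := by
        simp; omega
      have hnil : PySem.List.pyRange (pos + 1) (pos + 1) 1 = [] :=
        PySem.List.pyRange_one_eq_nil (le_refl _)
      simp only [sepsOf, if_neg h, List.cons_append, runsOfSeps, rcompT]
      rw [← harith, ih (pos + 1) pos (by omega), hnil]
      by_cases h2 : a + 1 < pos
      · have hne : PySem.List.pyRange (a + 1) pos 1 ≠ [] := by
          rw [PySem.List.pyRange_one_cons h2]; simp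
        rw [if_pos (by omega), if_neg hne]
        simp
      · have hnil2 : PySem.List.pyRange (a + 1) pos 1 = [] :=
          PySem.List.pyRange_one_eq_nil (by omega)
        rw [if_neg (by omega), if_pos hnil2]
        simp

-- outside D_ (no trailing 'S'), keeping the pending run changes nothing
lemma rcompT_eq_rcomp (l : List Char) : ∀ (cur : List Int) (pos : Int),
    l.getLast? ≠ some 'S' → (cur = [] ∨ l ≠ []) →
    rcompT cur pos l = rcomp cur pos l := by
  induction l with
  | nil =>
    intro cur pos _ hcur
    rcases hcur with h | h
    · simp [h, rcompT, rcomp]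
    · exact absurd rfl h
  | cons c cs ih =>
    intro cur pos hlast _
    have hlast' : cs ≠ [] → cs.getLast? ≠ some 'S' := by
      intro hne hcon
      apply hlast
      cases cs with
      | nil => exact absurd rfl hne
      | cons d ds => rw [List.getLast?_cons_cons]; exact hcon
    by_cases h : c = 'S'
    · have hne : cs ≠ [] := by
        intro hnil
        apply hlast
        rw [hnil]
        simp [h]
      simp only [rcompT, rcomp, if_pos h]
      exact ih _ _ (hlast' hne) (Or.inr hne)
    · by_cases hcs : cs = []
      · subst hcs
        simp [rcompT, rcomp, h]
      · simp only [rcompT, rcomp, if_neg h]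
        rw [ih [] (pos + 1) (hlast' hcs) (Or.inl rfl)]
    
lemma runsOfSeps_nodup (rest : List Int) : ∀ (a : Int) (r : List Int),
    r ∈ runsOfSeps a rest → r.Nodup := by
  induction rest with
  | nil => intro a r hr; simp [runsOfSeps] at hr
  | cons b bs ih =>
    intro a r hr
    rw [runsOfSeps, List.mem_append] at hr
    rcases hr with hr | hr
    · by_cases h : b - a > 1
      · rw [if_pos h, List.mem_singleton] at hr
        exact hr ▸ PySem.List.nodup_pyRange_one _ _
      · rw [if_neg h] at hr; simp at hr
    · exact ih b r hr

lemma items_dictOf (run : List Int) (h : run.Nodup) :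
    (dictOf run).items = run.map (fun i => (i, run)) := by
  have := PySem.Dict.items_foldl_insert_fresh (l := run) (k := fun i => i)
    (v := fun _ => run) (d := PySem.Dict.empty)
    (by intro a _; exact PySem.Dict.contains_empty a) (by simpa using h)
  simpa [dictOf] using this

-- B's dict as a fold of insRun over the gap runs
lemma altB_normal (ss_seq : String) :
    list_sheet_series_alt ss_seq
      = (((runsOfSeps (-1) (sepsOf 0 ss_seq.toList
            ++ [(ss_seq.toList.length : Int)])).reverse).foldl insRun PySem.Dict.empty).items := by
  simp only [list_sheet_series_alt]
  rw [foldB_eq_insRun, List.filterMap_reverse, sepsOf_eq]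
  simp only [List.cons_append, List.drop_succ_cons, List.drop_zero]
  rw [zip_filterMap_gaps]
  simp

-- ---- tightness: inside D_ the outputs always differ ----

lemma getLast?_cons_ne_nil {c : Char} {cs : List Char} (h : cs ≠ []) :
    (c :: cs).getLast? = cs.getLast? := by
  cases cs with
  | nil => exact absurd rfl h
  | cons d ds => simp [List.getLast?_cons_cons]

lemma rcomp_elem_lt : ∀ (l : List Char) (pos : Int) (cur : List Int),
    l.getLast? = some 'S' → (∀ i ∈ cur, i < pos) →
    ∀ r ∈ rcomp cur pos l, ∀ i ∈ r, i < pos + l.length - 1 := by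
  intro l
  induction l with
  | nil => intro pos cur h _; simp at h
  | cons c cs ih =>
    intro pos cur hlast hcur r hr i hi
    by_cases hc : c = 'S'
    · rw [rcomp, if_pos hc] at hr
      by_cases hcs : cs = []
      · rw [hcs] at hr; simp [rcomp] at hr
      · have hlast' : cs.getLast? = some 'S' := by
          rw [← getLast?_cons_ne_nil (c := c) hcs]; exact hlast
        have hcur' : ∀ j ∈ cur ++ [pos], j < pos + 1 := by
          intro j hj
          rcases List.mem_append.mp hj with h | h
          · exact lt_trans (hcur j h) (by omega)
          · simp at h; omega
        have := ih (pos + 1) (cur ++ [pos]) hlast' hcur' r hr i hi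
        simp only [List.length_cons] at this ⊢
        push_cast at this ⊢
        omega
    · have hcs : cs ≠ [] := by
        intro hnil
        rw [hnil] at hlast
        simp at hlast
        exact hc hlast
      have hlast' : cs.getLast? = some 'S' := by
        rw [← getLast?_cons_ne_nil (c := c) hcs]; exact hlast
      rw [rcomp, if_neg hc] at hr
      by_cases hcur0 : cur = []
      · rw [if_pos hcur0] at hr
        have := ih (pos + 1) [] hlast' (by simp) r hr i hi
        simp only [List.length_cons] at this ⊢
        push_cast at this ⊢
        omega
      · rw [if_neg hcur0] at hr
        rcases List.mem_cons.mp hr with h | h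
        · have := hcur i (h ▸ hi)
          have hlen1 : (1 : Int) ≤ cs.length := by
            cases cs with
            | nil => exact absurd rfl hcs
            | cons _ _ => simp only [List.length_cons]; push_cast; omega
          simp only [List.length_cons]
          push_cast
          omega
        · have := ih (pos + 1) [] hlast' (by simp) r h i hi
          simp only [List.length_cons] at this ⊢
          push_cast at this ⊢
          omega

lemma rcompT_last_mem : ∀ (l : List Char) (pos : Int) (cur : List Int),
    l.getLast? = some 'S' →
    ∃ r ∈ rcompT cur pos l, (pos + l.length - 1) ∈ r := by
  intro l
  induction l with
  | nil => intro pos cur h; simp at h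
  | cons c cs ih =>
    intro pos cur hlast
    by_cases hcs : cs = []
    · subst hcs
      have hc : c = 'S' := by simpa using hlast
      refine ⟨cur ++ [pos], ?_, by simp⟩
      simp [rcompT, hc]
    · have hlast' : cs.getLast? = some 'S' := by
        rw [← getLast?_cons_ne_nil (c := c) hcs]; exact hlast
      have harith : (pos + 1) + (cs.length : Int) - 1
          = pos + ((c :: cs : List Char).length : Int) - 1 := by
        simp; omega
      by_cases hc : c = 'S'
      · obtain ⟨r, hr, hk⟩ := ih (pos + 1) (cur ++ [pos]) hlast'
        exact ⟨r, by simpa [rcompT, hc] using hr, harith ▸ hk⟩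
      · obtain ⟨r, hr, hk⟩ := ih (pos + 1) [] hlast'
        refine ⟨r, ?_, harith ▸ hk⟩
        simp only [rcompT, if_neg hc]
        split_ifs with h
        · exact hr
        · exact List.mem_cons_of_mem _ hr

lemma keys_fold_pairs_subset : ∀ (ps : List (Int × List Int)) (d : PySem.Dict Int (List Int))
    (k : Int), k ∈ (ps.foldl (fun d kv => d.insert kv.1 kv.2) d).keys →
    k ∈ d.keys ∨ k ∈ ps.map Prod.fst := by
  intro ps
  induction ps with
  | nil => intro d k h; exact Or.inl h
  | cons p ps ih =>
    intro d k h
    rcases ih _ _ (by simpa using h) with h' | h'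
    · rcases (PySem.Dict.mem_keys_insert d p.1 k p.2).mp h' with h'' | h''
      · exact Or.inr (by simp [h''])
      · exact Or.inl h''
    · exact Or.inr (by simp only [List.map_cons, List.mem_cons]; exact Or.inr h')

lemma keys_fold_maps_subset : ∀ (ms : List (PySem.Dict Int (List Int)))
    (d : PySem.Dict Int (List Int)) (k : Int),
    k ∈ (ms.foldl (fun d m => m.items.foldl (fun d kv => d.insert kv.1 kv.2) d) d).keys →
    k ∈ d.keys ∨ ∃ m ∈ ms, k ∈ m.keys := by
  intro ms
  induction ms with
  | nil => intro d k h; exact Or.inl h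
  | cons m ms ih =>
    intro d k h
    rcases ih _ _ (by simpa using h) with h' | ⟨m', hm', hk⟩
    · rcases keys_fold_pairs_subset m.items d k h' with h'' | h''
      · exact Or.inl h''
      · exact Or.inr ⟨m, by simp, by simpa [PySem.Dict.keys] using h''⟩
    · exact Or.inr ⟨m', by simp [hm'], hk⟩

lemma keys_dictOf_subset (run : List Int) (k : Int) (h : k ∈ (dictOf run).keys) : k ∈ run := by
  have aux : ∀ (r : List Int) (d : PySem.Dict Int (List Int)),
      k ∈ (r.foldl (fun d cl => d.insert cl run) d).keys → k ∈ d.keys ∨ k ∈ r := by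
    intro r
    induction r with
    | nil => intro d h'; exact Or.inl h'
    | cons x r ih =>
      intro d h'
      rcases ih _ (by simpa using h') with h'' | h''
      · rcases (PySem.Dict.mem_keys_insert d x k run).mp h'' with h3 | h3
        · exact Or.inr (by simp [h3])
        · exact Or.inl h3
      · exact Or.inr (by simp [h''])
  rcases aux run PySem.Dict.empty h with h' | h'
  · simp [PySem.Dict.keys_empty] at h'
  · exact h'

lemma mem_keys_fold_runs : ∀ (runs : List (List Int)) (d : PySem.Dict Int (List Int)) (k : Int),
    (∃ r ∈ runs, k ∈ r) ∨ k ∈ d.keys →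
    k ∈ (runs.foldl insRun d).keys := by
  have inner : ∀ (r run : List Int) (d : PySem.Dict Int (List Int)) (k : Int),
      k ∈ r ∨ k ∈ d.keys → k ∈ (r.foldl (fun d i => d.insert i run) d).keys := by
    intro r run
    induction r with
    | nil => intro d k h; exact h.resolve_left (by simp)
    | cons x r ih =>
      intro d k h
      simp only [List.foldl_cons]
      apply ih
      rcases h with h | h
      · rcases List.mem_cons.mp h with h' | h'
        · exact Or.inr ((PySem.Dict.mem_keys_insert d x k run).mpr (Or.inl h'))
        · exact Or.inl h'
      · exact Or.inr ((PySem.Dict.mem_keys_insert d x k run).mpr (Or.inr h))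
  intro runs
  induction runs with
  | nil => intro d k h; exact h.resolve_left (by simp)
  | cons r runs ih =>
    intro d k h
    simp only [List.foldl_cons]
    apply ih
    rcases h with ⟨r', hr', hk⟩ | h
    · rcases List.mem_cons.mp hr' with h' | h'
      · exact Or.inr (inner r r d k (Or.inl (h' ▸ hk)))
      · exact Or.inl ⟨r', h', hk⟩
    · exact Or.inr (inner r r d k (Or.inr h))

-- ===== VERDICT (by name: the statement is the Claim_ definition above) =====
theorem list_sheet_series_spec : Claim_unchanged_list_sheet_series := by
  intro s _ hD
  show list_sheet_series s = list_sheet_series_alt s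
  rw [altB_normal]
  simp only [list_sheet_series]
  rw [foldA_fst, List.nil_append]
  have hRT : runsOfSeps (-1) (sepsOf 0 s.toList ++ [(s.toList.length : Int)])
      = rcompT [] 0 s.toList := by
    have := runsOfSeps_eq_rcompT s.toList 0 (-1) (by omega)
    simpa [PySem.List.pyRange_one_eq_nil (le_refl (0 : Int))] using this
  have hTC : rcompT [] 0 s.toList = rcomp [] 0 s.toList :=
    rcompT_eq_rcomp s.toList [] 0 hD (Or.inl rfl)
  have hnd : ∀ r ∈ rcomp [] 0 s.toList, r.Nodup := by
    intro r hr
    exact runsOfSeps_nodup _ (-1) r (by rw [hRT, hTC]; exact hr)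
  rw [hRT, hTC]
  rw [← List.map_reverse, List.foldl_map]
  apply congrArg
  apply PySem.List.foldl_congr_mem
  intro acc run hrun
  rw [items_dictOf run (hnd run (List.mem_reverse.mp hrun)), List.foldl_map]
  rfl

theorem list_sheet_series_changed : Claim_changed_list_sheet_series := by
  unfold Claim_changed_list_sheet_series
  refine ⟨by decide, by decide, by decide, ?_, by decide⟩
  show list_sheet_series_alt "S" = [(0, [0])]
  simp [list_sheet_series_alt, PySem.List.enumerate, PySem.List.pyRange]
  decide

theorem list_sheet_series_tight : Claim_exact_list_sheet_series := by
  intro s _ hD heq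
  have hlast : s.toList.getLast? = some 'S' := hD
  have hRT : runsOfSeps (-1) (sepsOf 0 s.toList ++ [(s.toList.length : Int)])
      = rcompT [] 0 s.toList := by
    have := runsOfSeps_eq_rcompT s.toList 0 (-1) (by omega)
    simpa [PySem.List.pyRange_one_eq_nil (le_refl (0 : Int))] using this
  obtain ⟨r, hr, hkr⟩ := rcompT_last_mem s.toList 0 [] hlast
  have hBkeys : (0 + (s.toList.length : Int) - 1) ∈ (((rcompT [] 0 s.toList).reverse).foldl
      insRun PySem.Dict.empty).keys :=
    mem_keys_fold_runs _ _ _ (Or.inl ⟨r, List.mem_reverse.mpr hr, hkr⟩)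
  have hBout : list_sheet_series_alt s = (((rcompT [] 0 s.toList).reverse).foldl
      insRun PySem.Dict.empty).items := by
    rw [altB_normal, hRT]
  have hAitems : list_sheet_series s = (((rcomp [] 0 s.toList).map dictOf).reverse.foldl
      (fun d m => m.items.foldl (fun d kv => d.insert kv.1 kv.2) d) PySem.Dict.empty).items := by
    simp only [list_sheet_series]
    rw [foldA_fst, List.nil_append]
  have hfst : (0 + (s.toList.length : Int) - 1) ∈ (list_sheet_series_alt s).map (·.1) := by
    rw [hBout]
    simpa [PySem.Dict.keys] using hBkeys
  rw [← heq, hAitems] at hfst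
  have hmem : (0 + (s.toList.length : Int) - 1) ∈ (((rcomp [] 0 s.toList).map dictOf).reverse.foldl
      (fun d m => m.items.foldl (fun d kv => d.insert kv.1 kv.2) d) PySem.Dict.empty).keys := by
    simpa [PySem.Dict.keys] using hfst
  rcases keys_fold_maps_subset _ _ _ hmem with h | ⟨m, hm, hkm⟩
  · simp [PySem.Dict.keys_empty] at h
  · obtain ⟨r', hr', hm'⟩ := List.mem_map.mp (List.mem_reverse.mp hm)
    have hkr' : (0 + (s.toList.length : Int) - 1) ∈ r' :=
      keys_dictOf_subset r' _ (hm' ▸ hkm)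
    have hlt := rcomp_elem_lt s.toList 0 [] hlast (by simp) r' hr' _ hkr'
    omega
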